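-- pv_equiv track=rewrite | github.com/RomanRetsen/code_clash | walker_tasks/midnight.py | midnight
-- ===== SOURCE A (Python) =====
-- from itertools import product
--
-- def not_skipped(the_combination):
--     the_steps = sorted([step_index[0] for step_index in the_combination])
--     current = the_steps[0]
--     if not current == 0:
--         return False
--     for i in range(1, len(the_steps), 1):
--         if the_steps[i] - current > 1:
--             return False
--         else:
--             current = the_steps[i]
--     else:
--         return True
--
-- def midnight(inlist):
--     enriched_list = [[(index, y) for index, y in enumerate(x)] for x in inlist]
--     the_max = 0
--     for comb in product(*enriched_list):
--         if 1 in (x[1] for x in comb) \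
--                 and 4 in (x[1] for x in comb) \
--                 and sum([x[1] for x in comb])-1-4 > the_max \
--                 and not_skipped(comb):
--             the_max = sum([x[1] for x in comb])- 1 - 4
--     return the_max
-- ===== SOURCE B (Python) =====
-- def midnight(inlist):
--     # DFS over rows with incremental state (index set, 1/4 flags, running sum);
--     # coverage of 0..max is checked as len(idxs) == max(idxs) + 1, no sorting.
--     def go(rows, idxs, has1, has4, total):
--         if not rows:
--             if has1 and has4 and len(idxs) == max(idxs) + 1:
--                 return total - 5
--             return 0
--         best = 0
--         for i, v in enumerate(rows[0]):
--             cand = go(rows[1:], idxs | {i}, has1 or v == 1, has4 or v == 4, total + v)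
--             if cand > best:
--                 best = cand
--         return best
--     return go(inlist, set(), False, False, 0)
-- ===== Notes on version B (the rewrite author's own statement) =====
-- stated objective: alternative
-- what changed: A materializes every itertools.product tuple and validates it by sorting its indices and scanning for gaps; B is a DFS over rows carrying incremental state (index set, 1/4-presence flags, running sum) and checks coverage of 0..max at each leaf by the cardinality identity len(idxs) == max(idxs)+1, with no tuple lists and no sorting.
import Mathlib
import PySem

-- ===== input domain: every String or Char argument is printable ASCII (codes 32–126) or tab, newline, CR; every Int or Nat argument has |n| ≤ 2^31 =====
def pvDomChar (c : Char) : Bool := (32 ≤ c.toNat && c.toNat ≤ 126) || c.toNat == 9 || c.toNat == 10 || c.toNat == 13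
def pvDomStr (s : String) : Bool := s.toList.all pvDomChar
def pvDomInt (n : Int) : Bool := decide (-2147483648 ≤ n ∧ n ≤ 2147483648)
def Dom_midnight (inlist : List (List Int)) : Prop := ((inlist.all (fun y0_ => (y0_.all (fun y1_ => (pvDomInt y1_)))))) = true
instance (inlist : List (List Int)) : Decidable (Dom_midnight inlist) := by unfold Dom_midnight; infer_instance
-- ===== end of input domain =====

-- B replaces A's product-of-rows enumeration with sorted-gap filtering by a DFS over rows
-- carrying incremental state (index set, 1/4 flags, running sum) and a cardinality-based
-- coverage test (len == max+1); objective: alternative decomposition, same exact values.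

-- ===== PORT A =====
-- the for-loop of not_skipped over the_steps[1:], carrying 'current'
def nsLoop : List Int → Int → Bool
  | [], _ => true
  | s :: rest, current => if s - current > 1 then false else nsLoop rest s

def notSkipped (comb : List (Int × Int)) : Bool :=
  match PySem.List.sorted (comb.map (·.1)) (fun x => x) false with
  | [] => false   -- Python raises IndexError at the_steps[0] here; midnight guards notSkipped behind '1 in …', so comb ≠ [] at every call
  | current :: rest => if !(current == 0) then false else nsLoop rest current

-- itertools.product(*lists)
def pyProduct {α : Type} : List (List α) → List (List α)
  | [] => [[]]
  | l :: rest => l.flatMap (fun x => (pyProduct rest).map (x :: ·))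

def midnight (inlist : List (List Int)) : Int :=
  let enriched := inlist.map (fun x => PySem.List.enumerate x)
  (pyProduct enriched).foldl
    (fun the_max comb =>
      if (comb.any (fun x => x.2 == 1)) && (comb.any (fun x => x.2 == 4))
          && decide ((comb.map (·.2)).sum - 1 - 4 > the_max) && notSkipped comb
      then (comb.map (·.2)).sum - 1 - 4
      else the_max) 0

-- ===== PORT B =====
-- len(idxs) == max(idxs) + 1; Python's max raises on an empty set, but Source B reaches this
-- only with has1 true, hence idxs nonempty — .getD 0 is never the decisive value there
def coverOk (idxs : PySem.Set Int) : Bool :=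
  PySem.Set.len idxs == ((PySem.List.max? idxs (fun x => x)).getD 0) + 1

def goB : List (List Int) → PySem.Set Int → Bool → Bool → Int → Int
  | [], idxs, h1, h4, total => if h1 && h4 && coverOk idxs then total - 5 else 0
  | _row :: rest, idxs, h1, h4, total =>
    (PySem.List.enumerate _row).foldl
      (fun best iv =>
        let cand := goB rest (PySem.Set.add idxs iv.1) (h1 || iv.2 == 1) (h4 || iv.2 == 4) (total + iv.2)
        if cand > best then cand else best) 0

def midnight_alt (inlist : List (List Int)) : Int := goB inlist PySem.Set.empty false false 0

-- ===== PRECONDITION & SPEC =====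
def Spec_midnight (inlist : List (List Int)) (out : Int) : Prop := out = midnight_alt inlist
instance (inlist : List (List Int)) (out : Int) : Decidable (Spec_midnight inlist out) := by unfold Spec_midnight; infer_instance

-- ===== CLAIM (what is proved, stated in full; the proofs are below) =====
def Claim_equal_midnight : Prop := ∀ (inlist : List (List Int)), Dom_midnight inlist → Spec_midnight inlist (midnight inlist)

-- ===== LEMMAS AND PROOFS =====

-- the value a single full combination contributes on B's side (proof-only abbreviation)
def rawLeaf (idxs : PySem.Set Int) (h1 h4 : Bool) (total : Int) (c : List (Int × Int)) : Int :=
  if (h1 || c.any (fun x => x.2 == 1)) && (h4 || c.any (fun x => x.2 == 4))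
      && coverOk (c.foldl (fun S p => PySem.Set.add S p.1) idxs)
  then total + (c.map (·.2)).sum - 5 else 0

-- the value a combination contributes on A's side
def aLeaf (c : List (Int × Int)) : Int :=
  if (c.any (fun x => x.2 == 1)) && (c.any (fun x => x.2 == 4)) && notSkipped c
  then (c.map (·.2)).sum - 1 - 4 else 0

lemma maxIf (a b : Int) : (if b > a then b else a) = max a b := by
  split_ifs with h <;> omega

lemma foldl_max_shift {α : Type} (f : α → Int) :
    ∀ (L : List α) (a b : Int),
      L.foldl (fun m c => max m (f c)) (max a b) = max a (L.foldl (fun m c => max m (f c)) b) := by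
  intro L
  induction L with
  | nil => intro a b; rfl
  | cons x t ih =>
      intro a b
      simp only [List.foldl_cons]
      rw [max_assoc, ih]

lemma nested_fold_eq {α β : Type} (F : α → β → Int) (P : List β) :
    ∀ (l : List α) (b : Int), 0 ≤ b →
      l.foldl (fun b x => P.foldl (fun m c => max m (F x c)) b) b
        = l.foldl (fun b x => max b (P.foldl (fun m c => max m (F x c)) 0)) b := by
  intro l
  induction l with
  | nil => intro b _; rfl
  | cons x t ih =>
      intro b hb
      simp only [List.foldl_cons]
      have hstep : P.foldl (fun m c => max m (F x c)) b
          = max b (P.foldl (fun m c => max m (F x c)) 0) := by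
        have := foldl_max_shift (F x) P b 0
        rwa [max_eq_left hb] at this
      rw [hstep, ih _ (le_trans hb (le_max_left _ _))]

lemma inner_eq {α : Type} (G : α → Int) :
    ∀ (l : List α) (b : Int), 0 ≤ b →
      l.foldl (fun b x => max b (G x)) b = l.foldl (fun b x => max b (max 0 (G x))) b := by
  intro l
  induction l with
  | nil => intro b _; rfl
  | cons x t ih =>
      intro b hb
      simp only [List.foldl_cons]
      have : max b (G x) = max b (max 0 (G x)) := by
        rw [← max_assoc, max_eq_left hb]
      rw [this, ih _ (le_trans hb (le_max_left _ _))]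

lemma rawLeaf_cons (idxs : PySem.Set Int) (h1 h4 : Bool) (t : Int) (iv : Int × Int)
    (c : List (Int × Int)) :
    rawLeaf idxs h1 h4 t (iv :: c)
      = rawLeaf (PySem.Set.add idxs iv.1) (h1 || iv.2 == 1) (h4 || iv.2 == 4) (t + iv.2) c := by
  simp only [rawLeaf, List.any_cons, List.foldl_cons, List.map_cons, List.sum_cons,
    Bool.or_assoc]
  split_ifs with h <;> [omega; rfl]

lemma pyProduct_mem {α : Type} :
    ∀ (Ls : List (List α)) (c : List α), c ∈ pyProduct Ls →
      c.length = Ls.length ∧ ∀ p ∈ c, ∃ l ∈ Ls, p ∈ l := by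
  intro Ls
  induction Ls with
  | nil =>
      intro c hc
      simp [pyProduct] at hc
      subst hc; simp
  | cons l rest ih =>
      intro c hc
      simp only [pyProduct, List.mem_flatMap, List.mem_map] at hc
      obtain ⟨x, hx, c', hc', rfl⟩ := hc
      obtain ⟨hlen, hmem⟩ := ih c' hc'
      constructor
      · simp [hlen]
      · intro p hp
        rcases List.mem_cons.mp hp with rfl | hp
        · exact ⟨l, List.mem_cons_self, hx⟩
        · obtain ⟨l', hl', hpl'⟩ := hmem p hp
          exact ⟨l', List.mem_cons_of_mem _ hl', hpl'⟩

-- walking nsLoop succeeds ⇒ every value between 'current' and any list element is hit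
lemma nsLoop_cover :
    ∀ (t : List Int) (c : Int), (c :: t).Pairwise (· ≤ ·) → nsLoop t c = true →
      ∀ k x, c ≤ k → x ∈ c :: t → k ≤ x → k ∈ c :: t := by
  intro t
  induction t with
  | nil =>
      intro c _ _ k x hck hx hkx
      have hxc : x = c := by simpa using hx
      rw [hxc] at hkx
      have : k = c := le_antisymm hkx hck
      simp [this]
  | cons s t' ih =>
      intro c hpw hns k x hck hx hkx
      have hstep : s - c ≤ 1 ∧ nsLoop t' s = true := by
        by_cases h : s - c > 1
        · simp [nsLoop, h] at hns
        · simp [nsLoop, h] at hns; exact ⟨by omega, hns⟩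
      rcases eq_or_lt_of_le hck with rfl | hlt
      · exact List.mem_cons_self
      · have hxs : x ∈ s :: t' := by
          rcases List.mem_cons.mp hx with rfl | hx
          · omega
          · exact hx
        have : k ∈ s :: t' := by
          apply ih s hpw.tail hstep.2 k x _ hxs hkx
          omega
        exact List.mem_cons_of_mem _ this
-- (note: c < k gives c + 1 ≤ k and s ≤ c + 1, hence s ≤ k)

-- coverage of [c, m] on a sorted list ⇒ nsLoop succeeds
lemma cover_nsLoop :
    ∀ (t : List Int) (c m : Int), (c :: t).Pairwise (· ≤ ·) →
      (∀ x ∈ c :: t, x ≤ m) → (∀ k, c ≤ k → k ≤ m → k ∈ c :: t) →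
      nsLoop t c = true := by
  intro t
  induction t with
  | nil => intro _ _ _ _ _; rfl
  | cons s t' ih =>
      intro c m hpw hub hcov
      have hcs : c ≤ s := (List.pairwise_cons.mp hpw).1 s List.mem_cons_self
      have hsm : s ≤ m := hub s (List.mem_cons_of_mem _ List.mem_cons_self)
      have hgap : ¬ (s - c > 1) := by
        intro hgt
        have h1 : c + 1 ∈ c :: s :: t' := hcov (c + 1) (by omega) (by omega)
        have h2 : ∀ y ∈ s :: t', s ≤ y := by
          intro y hy
          rcases List.mem_cons.mp hy with rfl | hy
          · exact le_rfl
          · exact (List.pairwise_cons.mp hpw.tail).1 y hy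
        rcases List.mem_cons.mp h1 with h | h
        · omega
        · have := h2 _ h; omega
      have hns' : nsLoop t' s = true := by
        apply ih s m hpw.tail
        · intro x hx; exact hub x (List.mem_cons_of_mem _ hx)
        · intro k hsk hkm
          have hk : k ∈ c :: s :: t' := hcov k (by omega) hkm
          rcases List.mem_cons.mp hk with rfl | hk
          · have : k = s := le_antisymm hcs hsk
            simp [this]
          · exact hk
      simp [nsLoop, hgap, hns']

-- the heart: A's sorted-gap test equals B's cardinality test, on nonempty nonneg index lists
lemma notSkipped_eq_cover (c : List (Int × Int)) (hne : c ≠ [])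
    (hpos : ∀ p ∈ c, 0 ≤ p.1) :
    notSkipped c = coverOk (PySem.Set.ofList (c.map (·.1))) := by
  set steps := c.map (·.1) with hsteps
  have hsne : steps ≠ [] := by simpa [hsteps] using hne
  have hpos' : ∀ x ∈ steps, 0 ≤ x := by
    intro x hx
    obtain ⟨p, hp, rfl⟩ := List.mem_map.mp hx
    exact hpos p hp
  set S := PySem.Set.ofList steps with hS
  cases hmax : PySem.List.max? S (fun x => x) with
  | none =>
      exfalso
      have : S = [] := (PySem.List.max?_eq_none_iff S _).mp hmax
      cases hst : steps with
      | nil => exact hsne hst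
      | cons a b =>
          have : a ∈ S := (PySem.Set.mem_ofList steps a).mpr (by rw [hst]; exact List.mem_cons_self)
          simp_all
  | some m =>
  have hmm : m ∈ steps := (PySem.Set.mem_ofList steps m).mp (PySem.List.max?_mem hmax)
  have hmax' : ∀ y ∈ steps, y ≤ m := by
    intro y hy
    exact PySem.List.max?_isMax hmax y ((PySem.Set.mem_ofList steps y).mpr hy)
  have hm0 : 0 ≤ m := hpos' m hmm
  -- reduce B's test
  have hcover : coverOk S = (PySem.Set.len S == m + 1) := by
    simp [coverOk, hmax]
  -- sorted list for A's test
  cases hsort : PySem.List.sorted steps (fun x => x) false with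
  | nil =>
      exact absurd ((PySem.List.sorted_eq_nil_iff steps _ false).mp hsort) hsne
  | cons h tl =>
  have hperm : (h :: tl).Perm steps := hsort ▸ PySem.List.sorted_perm steps (fun x => x) false
  have hpw : (h :: tl).Pairwise (· ≤ ·) := by
    have := PySem.List.sorted_pairwise steps (fun x => x)
    rw [hsort] at this
    simpa using this
  have hmemiff : ∀ y : Int, y ∈ h :: tl ↔ y ∈ steps := fun y => hperm.mem_iff
  have hns : notSkipped c = (if !(h == 0) then false else nsLoop tl h) := by
    unfold notSkipped
    rw [← hsteps, hsort]
  -- both tests are equivalent to covering every integer of [0, m]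
  have claim1 : (notSkipped c = true) ↔ (∀ k : Int, 0 ≤ k → k ≤ m → k ∈ steps) := by
    rw [hns]
    constructor
    · intro hnst
      by_cases h0 : h = 0
      · simp only [h0, BEq.rfl, Bool.not_true, Bool.false_eq_true, if_false] at hnst
        intro k hk0 hkm
        subst h0
        exact (hmemiff k).mp
          (nsLoop_cover tl 0 hpw hnst k m hk0 ((hmemiff m).mpr hmm) hkm)
      · simp [h0] at hnst
    · intro hcov
      have hh0 : h = 0 := by
        have hhs : h ∈ steps := (hmemiff h).mp List.mem_cons_self
        have h0mem : (0 : Int) ∈ h :: tl := (hmemiff 0).mpr (hcov 0 le_rfl hm0)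
        have hge : 0 ≤ h := hpos' h hhs
        have hle : h ≤ 0 := by
          rcases List.mem_cons.mp h0mem with h' | h'
          · omega
          · exact (List.pairwise_cons.mp hpw).1 0 h'
        omega
      subst hh0
      have hnsl : nsLoop tl 0 = true := by
        apply cover_nsLoop tl 0 m hpw
        · intro x hx; exact hmax' x ((hmemiff x).mp hx)
        · intro k hk hkm; exact (hmemiff k).mpr (hcov k hk hkm)
      simp [hnsl]
  have claim2 : ((PySem.Set.len S == m + 1) = true) ↔ (∀ k : Int, 0 ≤ k → k ≤ m → k ∈ steps) := by
    have hnodup : S.Nodup := PySem.Set.nodup_ofList steps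
    have hcard : S.toFinset.card = S.length := List.toFinset_card_of_nodup hnodup
    have hsub : S.toFinset ⊆ Finset.Icc (0 : Int) m := by
      intro x hx
      have hxs : x ∈ steps := (PySem.Set.mem_ofList steps x).mp (List.mem_toFinset.mp hx)
      exact Finset.mem_Icc.mpr ⟨hpos' x hxs, hmax' x hxs⟩
    have hIcc : (Finset.Icc (0 : Int) m).card = (m + 1).toNat := by
      rw [Int.card_Icc]; norm_num
    constructor
    · intro hco
      have hlen : (S.length : Int) = m + 1 := by
        simpa [PySem.Set.len] using hco
      have hle : (Finset.Icc (0 : Int) m).card ≤ S.toFinset.card := by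
        rw [hIcc, hcard]; omega
      have hTeq : S.toFinset = Finset.Icc (0 : Int) m :=
        Finset.eq_of_subset_of_card_le hsub hle
      intro k hk0 hkm
      have : k ∈ S.toFinset := hTeq ▸ Finset.mem_Icc.mpr ⟨hk0, hkm⟩
      exact (PySem.Set.mem_ofList steps k).mp (List.mem_toFinset.mp this)
    · intro hcov
      have hsup : Finset.Icc (0 : Int) m ⊆ S.toFinset := by
        intro k hk
        rw [Finset.mem_Icc] at hk
        exact List.mem_toFinset.mpr ((PySem.Set.mem_ofList steps k).mpr (hcov k hk.1 hk.2))
      have hTeq : S.toFinset = Finset.Icc (0 : Int) m := Finset.Subset.antisymm hsub hsup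
      have hlen : S.length = (m + 1).toNat := by rw [← hcard, hTeq, hIcc]
      simp [PySem.Set.len, hlen]
      omega
  rw [hcover]
  cases hb : (PySem.Set.len S == m + 1) with
  | true => exact claim1.mpr (claim2.mp hb)
  | false =>
      cases hnsb : notSkipped c with
      | false => rfl
      | true =>
          exfalso
          have := claim2.mpr (claim1.mp hnsb)
          rw [hb] at this
          exact Bool.false_ne_true this

lemma aLeaf_eq_rawLeaf (rows : List (List Int)) (c : List (Int × Int))
    (hc : c ∈ pyProduct (rows.map (fun x => PySem.List.enumerate x))) :
    aLeaf c = rawLeaf PySem.Set.empty false false 0 c := by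
  rcases eq_or_ne c [] with rfl | hne
  · simp [aLeaf, rawLeaf]
  · have hpos : ∀ p ∈ c, 0 ≤ p.1 := by
      intro p hp
      obtain ⟨l, hl, hpl⟩ := (pyProduct_mem _ c hc).2 p hp
      obtain ⟨x, hx, rfl⟩ := List.mem_map.mp hl
      obtain ⟨k, hk, rfl⟩ := (PySem.List.mem_enumerate_iff x 0 p).mp hpl
      simp
    have hns : notSkipped c = coverOk (c.foldl (fun S p => PySem.Set.add S p.1) PySem.Set.empty) := by
      rw [notSkipped_eq_cover c hne hpos, PySem.Set.ofList_eq_foldl, List.foldl_map]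
      rfl
    simp only [aLeaf, rawLeaf, Bool.false_or, hns]
    split_ifs with h <;> [omega; rfl]

lemma goB_cons_eq (row : List Int) (rest : List (List Int)) (idxs : PySem.Set Int)
    (h1 h4 : Bool) (t : Int) :
    goB (row :: rest) idxs h1 h4 t
      = (PySem.List.enumerate row).foldl
          (fun best iv => max best
            (goB rest (PySem.Set.add idxs iv.1) (h1 || iv.2 == 1) (h4 || iv.2 == 4) (t + iv.2))) 0 := by
  simp only [goB, maxIf]

lemma goB_nonneg (rows : List (List Int)) (idxs : PySem.Set Int) (h4 : Bool) (t : Int) :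
    0 ≤ goB rows idxs false h4 t := by
  cases rows with
  | nil => simp [goB]
  | cons row rest =>
      rw [goB_cons_eq]
      exact (PySem.List.le_foldl_max_int _ _ 0).1

lemma foldl_flatMap {α β γ : Type} (g : α → List β) (f : γ → β → γ) :
    ∀ (l : List α) (init : γ),
      (l.flatMap g).foldl f init = l.foldl (fun acc x => (g x).foldl f acc) init := by
  intro l
  induction l with
  | nil => intro init; rfl
  | cons x t ih => intro init; simp [List.flatMap_cons, List.foldl_append, ih]

lemma goB_eq :
    ∀ (rows : List (List Int)) (idxs : PySem.Set Int) (h1 h4 : Bool) (t : Int),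
      max 0 (goB rows idxs h1 h4 t)
        = (pyProduct (rows.map (fun x => PySem.List.enumerate x))).foldl
            (fun b c => max b (rawLeaf idxs h1 h4 t c)) 0 := by
  intro rows
  induction rows with
  | nil =>
      intro idxs h1 h4 t
      have hleaf : goB [] idxs h1 h4 t = rawLeaf idxs h1 h4 t [] := by
        simp only [rawLeaf, goB, List.any_nil, Bool.or_false, List.foldl_nil, List.map_nil,
          List.sum_nil]
        split_ifs <;> omega
      simp only [List.map_nil, pyProduct, List.foldl_cons, List.foldl_nil, hleaf]
  | cons row rest ih =>
      intro idxs h1 h4 t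
      have hnn : 0 ≤ goB (row :: rest) idxs h1 h4 t := by
        rw [goB_cons_eq]
        exact (PySem.List.le_foldl_max_int _ _ 0).1
      rw [max_eq_right hnn, goB_cons_eq, inner_eq _ _ 0 le_rfl]
      simp only [ih]
      simp only [List.map_cons, pyProduct]
      rw [foldl_flatMap]
      simp only [List.foldl_map, rawLeaf_cons]
      rw [nested_fold_eq
        (fun iv c => rawLeaf (PySem.Set.add idxs iv.1) (h1 || iv.2 == 1) (h4 || iv.2 == 4)
          (t + iv.2) c)
        (pyProduct (rest.map (fun x => PySem.List.enumerate x)))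
        (PySem.List.enumerate row) 0 le_rfl]

lemma A_fold :
    ∀ (combs : List (List (Int × Int))) (m : Int), 0 ≤ m →
      combs.foldl
        (fun the_max comb =>
          if (comb.any (fun x => x.2 == 1)) && (comb.any (fun x => x.2 == 4))
              && decide ((comb.map (·.2)).sum - 1 - 4 > the_max) && notSkipped comb
          then (comb.map (·.2)).sum - 1 - 4
          else the_max) m
        = combs.foldl (fun b c => max b (aLeaf c)) m := by
  intro combs
  induction combs with
  | nil => intro m _; rfl
  | cons c l ih =>
      intro m hm
      simp only [List.foldl_cons]
      have hstep :
          (if (c.any (fun x => x.2 == 1)) && (c.any (fun x => x.2 == 4))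
              && decide ((c.map (·.2)).sum - 1 - 4 > m) && notSkipped c
           then (c.map (·.2)).sum - 1 - 4 else m) = max m (aLeaf c) := by
        unfold aLeaf
        cases hA : c.any (fun x => x.2 == 1) <;>
          cases hB : c.any (fun x => x.2 == 4) <;>
            cases hN : notSkipped c <;>
              simp <;>
              first
                | exact hm
                | (split_ifs <;> omega)
      rw [hstep, ih _ (le_trans hm (le_max_left _ _))]

-- ===== VERDICT (by name: the statement is the Claim_ definition above) =====
theorem midnight_spec : Claim_equal_midnight := by
  intro inlist _dom
  unfold Spec_midnight
  show midnight inlist = midnight_alt inlist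
  unfold midnight midnight_alt
  rw [A_fold _ 0 le_rfl]
  rw [PySem.List.foldl_congr_mem _ _ (fun b c => max b (rawLeaf PySem.Set.empty false false 0 c)) 0
    (fun acc c hc => by rw [aLeaf_eq_rawLeaf inlist c hc])]
  rw [← goB_eq]
  exact max_eq_right (goB_nonneg inlist PySem.Set.empty false 0)
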